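-- pv_equiv track=rewrite | github.com/Kavya30S/EduHope | app/services/translation_service.py | make_child_friendly
-- ===== SOURCE A (Python) =====
-- def make_child_friendly(text: str) -> str:
--     """Replace inappropriate words with child-friendly alternatives"""
--     replacements = {
--         'violence': 'disagreement', 'war': 'adventure', 'death': 'sleeping',
--         'scary': 'exciting', 'fight': 'competition', 'hurt': 'ouch',
--         'sad': 'thoughtful', 'angry': 'frustrated', 'afraid': 'curious',
--         'worry': 'wonder'
--     }
--
--     for word, replacement in replacements.items():
--         text = text.replace(word.lower(), replacement)
--         text = text.replace(word.capitalize(), replacement.capitalize())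
--
--     return text
-- ===== SOURCE B (Python) =====
-- # Single left-to-right scan: at each index try the (ordered) pattern table once, emit the
-- # replacement (or the literal char) and advance; no repeated full-text passes.
-- _PAIRS = (
--     ('violence', 'disagreement'), ('Violence', 'Disagreement'),
--     ('war', 'adventure'), ('War', 'Adventure'),
--     ('death', 'sleeping'), ('Death', 'Sleeping'),
--     ('scary', 'exciting'), ('Scary', 'Exciting'),
--     ('fight', 'competition'), ('Fight', 'Competition'),
--     ('hurt', 'ouch'), ('Hurt', 'Ouch'),
--     ('sad', 'thoughtful'), ('Sad', 'Thoughtful'),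
--     ('angry', 'frustrated'), ('Angry', 'Frustrated'),
--     ('afraid', 'curious'), ('Afraid', 'Curious'),
--     ('worry', 'wonder'), ('Worry', 'Wonder'),
-- )
--
--
-- def make_child_friendly(text: str) -> str:
--     out = []
--     i = 0
--     n = len(text)
--     while i < n:
--         for w, r in _PAIRS:
--             if text.startswith(w, i):
--                 out.append(r)
--                 i += len(w)
--                 break
--         else:
--             out.append(text[i])
--             i += 1
--     return ''.join(out)
-- ===== Notes on version B (the rewrite author's own statement) =====
-- stated objective: alternative
-- what changed: B replaces A's 20 sequential full-text replace passes by a single left-to-right scan that at each index tries the ordered pattern table once and emits the replacement or the literal character; equivalent because no replacement contains a pattern and patterns only interact on the 10 excluded junction/overlap substrings.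
-- outside the precondition, e.g. on make_child_friendly('swar'): A returns 'thoughtfulventure', B returns 'sadventure'; on make_child_friendly('sadeath'): A returns 'sasleeping', B returns 'thoughtfuleath'
import Mathlib
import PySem

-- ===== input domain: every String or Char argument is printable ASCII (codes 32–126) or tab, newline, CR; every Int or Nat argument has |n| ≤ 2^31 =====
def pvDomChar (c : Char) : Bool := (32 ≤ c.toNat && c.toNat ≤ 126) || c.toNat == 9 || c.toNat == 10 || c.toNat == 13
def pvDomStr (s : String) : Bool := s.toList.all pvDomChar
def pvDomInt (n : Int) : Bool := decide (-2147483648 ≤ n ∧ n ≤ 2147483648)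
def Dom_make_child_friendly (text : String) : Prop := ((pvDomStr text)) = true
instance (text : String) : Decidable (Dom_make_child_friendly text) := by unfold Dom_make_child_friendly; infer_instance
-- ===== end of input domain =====

-- B replaces A's 20 sequential full-text replace passes by ONE left-to-right scan with an
-- ordered pattern table ('alternative', not faster); equal on Pre_ (texts without the 10
-- junction/overlap substrings on which pass order is observable).

-- ===== PORT A =====
-- word.capitalize(): first char upper-cased, rest lower-cased (exact on the ASCII domain here).
def pyCapitalize (s : List Char) : List Char :=
  match s with
  | [] => []
  | c :: t => PySem.Chars.upperChar c :: PySem.Chars.lower t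

def make_child_friendly (text : String) : String :=
  let replacements : PySem.Dict String String := ⟨[
    ("violence", "disagreement"), ("war", "adventure"), ("death", "sleeping"),
    ("scary", "exciting"), ("fight", "competition"), ("hurt", "ouch"),
    ("sad", "thoughtful"), ("angry", "frustrated"), ("afraid", "curious"),
    ("worry", "wonder")]⟩
  replacements.items.foldl
    (fun t wr =>
      let t1 := PySem.Str.replace t (PySem.Str.lower wr.1) wr.2
      PySem.Str.replace t1 (String.ofList (pyCapitalize wr.1.toList))
        (String.ofList (pyCapitalize wr.2.toList)))
    text

-- ===== PORT B =====
-- the ordered pattern table of Source B (_PAIRS)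
def pvPairs : List (List Char × List Char) := [
  ("violence".toList, "disagreement".toList),
  ("Violence".toList, "Disagreement".toList),
  ("war".toList, "adventure".toList),
  ("War".toList, "Adventure".toList),
  ("death".toList, "sleeping".toList),
  ("Death".toList, "Sleeping".toList),
  ("scary".toList, "exciting".toList),
  ("Scary".toList, "Exciting".toList),
  ("fight".toList, "competition".toList),
  ("Fight".toList, "Competition".toList),
  ("hurt".toList, "ouch".toList),
  ("Hurt".toList, "Ouch".toList),
  ("sad".toList, "thoughtful".toList),
  ("Sad".toList, "Thoughtful".toList),
  ("angry".toList, "frustrated".toList),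
  ("Angry".toList, "Frustrated".toList),
  ("afraid".toList, "curious".toList),
  ("Afraid".toList, "Curious".toList),
  ("worry".toList, "wonder".toList),
  ("Worry".toList, "Wonder".toList)]

-- Source B's while loop: at the current position take the first table entry that is a prefix of
-- the remaining text (text.startswith(w, i)), append its replacement to `out` and skip it;
-- otherwise append the literal character; join `out` at the end.
def scanGo (t : List Char) (out : List (List Char)) : List Char :=
  match t with
  | [] => PySem.Chars.join [] out
  | c :: rest =>
    match hf : pvPairs.find? (fun p => p.1.isPrefixOf (c :: rest)) with
    | some p =>
      if hne : p.1 = [] then c :: rest  -- unreachable: every pattern in pvPairs is nonempty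
      else scanGo ((c :: rest).drop p.1.length) (out ++ [p.2])
    | none => scanGo rest (out ++ [[c]])
termination_by t.length
decreasing_by
  · simp only [List.length_drop, List.length_cons]
    have hw : 0 < p.1.length := List.length_pos_of_ne_nil hne
    omega
  · simp only [List.length_cons]
    omega

def make_child_friendly_alt (text : String) : String :=
  String.ofList (scanGo text.toList [])

-- ===== PRECONDITION & SPEC =====
-- the 10 substrings on which a replacement or an overlap creates/destroys a match of a
-- later pass, so that A's sequential passes and B's single simultaneous scan disagree
def pvBad : List (List Char) := [
  "sadeath".toList, "Sadeath".toList, "afraideath".toList, "Afraideath".toList,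
  "swar".toList, "Swar".toList, "saviolence".toList, "Saviolence".toList,
  "afraiviolence".toList, "Afraiviolence".toList]

-- Pre_ excludes texts containing one of the 10 listed substrings, where a replacement made
-- by an earlier pass (or an overlap of two patterns) creates or destroys a match of a later
-- pass: there sequential-vs-simultaneous substitution is an unspecified corner (on 'swar'
-- A's sad-pass rewrites the adventure it just inserted; B substitutes simultaneously).
def Pre_make_child_friendly (text : String) : Prop :=
  ∀ b ∈ pvBad, ¬ b <:+: text.toList
instance (text : String) : Decidable (Pre_make_child_friendly text) := by
  unfold Pre_make_child_friendly; infer_instance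

def pvWitness_make_child_friendly : String := "Scary stories about war and death"

def Spec_make_child_friendly (text : String) (out : String) : Prop := out = make_child_friendly_alt text
instance (text : String) (out : String) : Decidable (Spec_make_child_friendly text out) := by unfold Spec_make_child_friendly; infer_instance

-- ===== CLAIM (what is proved, stated in full; the proofs are below) =====
def Claim_equal_make_child_friendly : Prop := ∀ (text : String), Dom_make_child_friendly text → Pre_make_child_friendly text → Spec_make_child_friendly text (make_child_friendly text)

-- ===== LEMMAS AND PROOFS =====

-- `good t`: t avoids the 10 bad substrings (Pre_ on the character list)
def pvGood (t : List Char) : Prop := ∀ b ∈ pvBad, ¬ b <:+: t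

-- reference scanner over an arbitrary ordered pattern table (the generic form of scanGo,
-- without the output accumulator)
def scan (L : List (List Char × List Char)) (t : List Char) : List Char :=
  match t with
  | [] => []
  | c :: rest =>
    match hf : L.find? (fun p => p.1.isPrefixOf (c :: rest)) with
    | some p =>
      if hne : p.1 = [] then c :: rest
      else p.2 ++ scan L ((c :: rest).drop p.1.length)
    | none => c :: scan L rest
termination_by t.length
decreasing_by
  · simp only [List.length_drop, List.length_cons]
    have hw : 0 < p.1.length := List.length_pos_of_ne_nil hne
    omega
  · simp only [List.length_cons]
    omega

-- the no-interaction conditions of a new pair (w, r) appended after the table M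
def pvHyp (M : List (List Char × List Char)) (w r : List Char) : Prop :=
  w ≠ [] ∧
  (∀ p ∈ M, p.1 ≠ [] ∧ p.2 ≠ []) ∧
  (∀ p ∈ M, ¬ w <:+: p.2) ∧
  (∀ p ∈ M, ∀ n < w.length, 0 < n → w.drop n <+: p.2 → (w.take n ++ p.1) ∈ pvBad) ∧
  (∀ p ∈ M, ∀ n < w.length, 0 < n → ¬ p.2 <+: w.drop n) ∧
  (∀ p ∈ M, ∀ n < p.2.length, ¬ p.2.drop n <+: w) ∧
  (∀ p ∈ M, ∀ q < w.length, 0 < q → w.drop q <+: p.1 → w.length < q + p.1.length →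
      (w ++ p.1.drop (w.length - q)) ∈ pvBad) ∧
  (∀ p ∈ M, ∀ q < w.length, 0 < q → ¬ (q + p.1.length ≤ w.length ∧ p.1 <+: w.drop q))

-- pvHypList M L: every pair of L satisfies pvHyp against the table before it
def pvHypList : List (List Char × List Char) → List (List Char × List Char) → Prop
  | _, [] => True
  | M, p :: rest => pvHyp M p.1 p.2 ∧ pvHypList (M ++ [p]) rest

-- reference form of one replace pass (no accumulator)
def pvModel (w r t : List Char) : List Char :=
  if _h : 0 ≤ PySem.Chars.find t w ∧ w ≠ [] then
    t.take (PySem.Chars.find t w).toNat ++ r ++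
      pvModel w r (t.drop ((PySem.Chars.find t w).toNat + w.length))
  else t
termination_by t.length
decreasing_by
  have hsp := PySem.Chars.find_spec _h.1
  have hle := hsp.1.length_le
  simp only [List.length_drop] at hle ⊢
  have hw : 0 < w.length := List.length_pos_of_ne_nil _h.2
  omega

lemma find_eq_of (t w : List Char) (k : Nat) (h1 : w <+: t.drop k)
    (h2 : ∀ i < k, ¬ w <+: t.drop i) : PySem.Chars.find t w = (k : Int) := by
  have hin : 0 ≤ PySem.Chars.find t w := by
    rw [PySem.Chars.find_nonneg_iff]
    exact (PySem.Chars.isIn_iff_infix w t).1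
      ((PySem.Chars.exists_prefix_drop_iff_isIn w t).1 ⟨k, h1⟩)
  obtain ⟨hpre, hmin⟩ := PySem.Chars.find_spec hin
  have : (PySem.Chars.find t w).toNat = k := by
    rcases Nat.lt_trichotomy (PySem.Chars.find t w).toNat k with h | h | h
    · exact absurd hpre (h2 _ h)
    · exact h
    · exact absurd h1 (hmin _ h)
  omega

lemma model_nil (w r : List Char) : pvModel w r [] = [] := by
  rw [pvModel]
  split
  · next h =>
    exfalso
    have : w <:+: ([] : List Char) := (PySem.Chars.find_nonneg_iff _ _).1 h.1
    exact h.2 (List.infix_nil.1 this)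
  · rfl

lemma model_prefix (w r t : List Char) (hw : w ≠ []) (hp : w <+: t) :
    pvModel w r t = r ++ pvModel w r (t.drop w.length) := by
  have hf : PySem.Chars.find t w = (0 : Int) := by
    have := find_eq_of t w 0 (by simpa using hp) (by omega)
    simpa using this
  rw [pvModel]
  rw [dif_pos ⟨by rw [hf], hw⟩]
  simp [hf]

lemma model_cons (w r : List Char) (c : Char) (t : List Char)
    (hnp : ¬ w <+: (c :: t)) : pvModel w r (c :: t) = c :: pvModel w r t := by
  have hw : w ≠ [] := by rintro rfl; exact hnp (List.nil_prefix)
  by_cases hfind : 0 ≤ PySem.Chars.find t w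
  · obtain ⟨hpre, hmin⟩ := PySem.Chars.find_spec hfind
    set j := (PySem.Chars.find t w).toNat with hj
    have hf : PySem.Chars.find (c :: t) w = ((j + 1 : Nat) : Int) := by
      apply find_eq_of
      · simpa using hpre
      · intro i hi
        cases i with
        | zero => simpa using hnp
        | succ i' => simpa using hmin i' (by omega)
    rw [pvModel, dif_pos ⟨by rw [hf]; positivity, hw⟩]
    conv_rhs => rw [pvModel, dif_pos ⟨hfind, hw⟩]
    rw [hf]
    simp [← hj, List.take_succ_cons, List.drop_succ_cons, Nat.add_right_comm]
  · have hft : PySem.Chars.find t w = -1 := by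
      have := PySem.Chars.neg_one_le_find t w
      omega
    have hfc : PySem.Chars.find (c :: t) w = -1 := by
      rw [PySem.Chars.find_eq_neg_one_iff]
      rw [List.infix_cons_iff]
      rintro (h | h)
      · exact hnp h
      · exact ((PySem.Chars.find_eq_neg_one_iff t w).1 hft) h
    rw [pvModel, dif_neg (by rw [hfc]; simp), pvModel, dif_neg (by rw [hft]; simp)]

lemma go_eq_model (w r : List Char) (hw : w ≠ []) :
    ∀ (fuel : Nat) (t acc : List Char), t.length ≤ fuel →
      PySem.Chars.replace.go w r fuel t acc = acc.reverse ++ pvModel w r t := by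
  intro fuel
  induction fuel with
  | zero =>
    intro t acc hlen
    have : t = [] := List.eq_nil_of_length_eq_zero (by omega)
    subst this
    simp [PySem.Chars.replace.go, model_nil]
  | succ n ih =>
    intro t acc hlen
    cases t with
    | nil => simp [PySem.Chars.replace.go, model_nil]
    | cons c t' =>
      by_cases hp : w.isPrefixOf (c :: t')
      · have hpre : w <+: (c :: t') := by rwa [← List.isPrefixOf_iff_prefix]
        have hwpos : 0 < w.length := List.length_pos_of_ne_nil hw
        rw [PySem.Chars.replace.go, if_pos hp]
        rw [ih _ _ (by simp at hlen ⊢; omega)]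
        rw [model_prefix w r _ hw hpre]
        simp
      · have hnpre : ¬ w <+: (c :: t') := by rw [List.isPrefixOf_iff_prefix] at hp; exact hp
        rw [PySem.Chars.replace.go, if_neg hp]
        rw [ih _ _ (by simp at hlen ⊢; omega)]
        rw [model_cons w r c t' hnpre]
        simp

lemma replace_eq_model (t w r : List Char) (hw : w ≠ []) :
    PySem.Chars.replace t w r = pvModel w r t := by
  rw [PySem.Chars.replace, if_neg (by simpa using hw)]
  simpa using go_eq_model w r hw t.length t [] le_rfl

lemma join_nil_flatten : ∀ (l : List (List Char)), PySem.Chars.join [] l = l.flatten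
  | [] => by simp [PySem.Chars.join, List.intercalate]
  | [x] => by simp [PySem.Chars.join, List.intercalate]
  | x :: y :: l => by
    have ih := join_nil_flatten (y :: l)
    simp only [PySem.Chars.join, List.intercalate] at ih ⊢
    simp only [List.intersperse_cons₂, List.flatten_cons] at ih ⊢
    simp [ih]

-- scan with the empty table is the identity
lemma scan_nil (t : List Char) : scan [] t = t := by
  induction t with
  | nil => rw [scan]
  | cons c rest ih => rw [scan]; simpa using ih

-- goodness is inherited by substrings
lemma good_mono {u t : List Char} (h : u <:+: t) (hg : pvGood t) : pvGood u := by
  intro b hb hbu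
  exact hg b hb (hbu.trans h)

-- equation lemmas for scan
lemma scan_cons_some (L : List (List Char × List Char)) (c : Char) (rest : List Char)
    (p : List Char × List Char)
    (hf : L.find? (fun p => p.1.isPrefixOf (c :: rest)) = some p) (hne : p.1 ≠ []) :
    scan L (c :: rest) = p.2 ++ scan L ((c :: rest).drop p.1.length) := by
  rw [scan]
  split
  · next p' heq =>
    rw [hf] at heq
    cases heq
    rw [dif_neg hne]
  · next heq => rw [hf] at heq; cases heq

lemma scan_cons_none (L : List (List Char × List Char)) (c : Char) (rest : List Char)
    (hf : L.find? (fun p => p.1.isPrefixOf (c :: rest)) = none) :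
    scan L (c :: rest) = c :: scan L rest := by
  rw [scan]
  split
  · next p' heq => rw [hf] at heq; cases heq
  · rfl

-- a model pass commutes with prepending a block containing no occurrence of w
lemma model_append_of_no_occ (w r : List Char) :
    ∀ (y X : List Char), (∀ n < y.length, ¬ w <+: (y ++ X).drop n) →
      pvModel w r (y ++ X) = y ++ pvModel w r X := by
  intro y
  induction y with
  | nil => intro X _; simp
  | cons c y' ih =>
    intro X hno
    have h0 : ¬ w <+: (c :: (y' ++ X)) := by simpa using hno 0 (by simp)
    rw [List.cons_append, model_cons w r c (y' ++ X) h0, ih X (fun n hn => by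
      have := hno (n + 1) (by simp; omega)
      simpa using this)]
    simp

-- scan copies a block in which no table entry matches
lemma scan_copy (L : List (List Char × List Char)) :
    ∀ (u v : List Char), (∀ q < u.length, L.find? (fun p => p.1.isPrefixOf ((u ++ v).drop q)) = none) →
      scan L (u ++ v) = u ++ scan L v := by
  intro u
  induction u with
  | nil => intro v _; simp
  | cons c u' ih =>
    intro v hno
    have h0 := hno 0 (by simp)
    simp only [List.drop_zero, List.cons_append] at h0
    rw [List.cons_append, scan_cons_none L c (u' ++ v) h0, ih v (fun q hq => by
      have := hno (q + 1) (by simp; omega)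
      simpa using this)]
    simp

-- NOHANG: under pvHyp, no suffix b of the new pattern w = a ++ b can be a prefix of the
-- scan of t when the characters a immediately precede t and w does not occur at that seam
lemma nohang_aux (M : List (List Char × List Char)) (w r : List Char) (hyp : pvHyp M w r) :
    ∀ (N : Nat) (t a b : List Char), t.length ≤ N → pvGood (a ++ t) → a ≠ [] → b ≠ [] →
      w = a ++ b → ¬ w <+: a ++ t → ¬ b <+: scan M t := by
  intro N
  induction N with
  | zero =>
    intro t a b hlen _ _ hb _ _ hpre
    have ht : t = [] := List.eq_nil_of_length_eq_zero (by omega)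
    subst ht
    rw [scan] at hpre
    exact hb (List.prefix_nil.1 hpre)
  | succ N ih =>
    intro t a b hlen hg ha hb hwdef hnw hpre
    obtain ⟨h1, h2, h3, h4, h5, h6, h7, h8⟩ := hyp
    cases t with
    | nil =>
      rw [scan] at hpre
      exact hb (List.prefix_nil.1 hpre)
    | cons c rest =>
      cases hf : M.find? (fun p => p.1.isPrefixOf (c :: rest)) with
      | some p =>
        have hpmem := List.mem_of_find?_eq_some hf
        have hppre : p.1 <+: (c :: rest) := by
          have := List.find?_some hf
          rwa [List.isPrefixOf_iff_prefix] at this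
        have hp1 : p.1 ≠ [] := (h2 p hpmem).1
        rw [scan_cons_some M c rest p hf hp1] at hpre
        have han : 0 < a.length := List.length_pos_of_ne_nil ha
        have hbn : 0 < b.length := List.length_pos_of_ne_nil hb
        have hn : a.length < w.length := by rw [hwdef]; simp; omega
        have hdrop : w.drop a.length = b := by rw [hwdef, List.drop_left]
        have htake : w.take a.length = a := by rw [hwdef, List.take_left]
        by_cases hlb : b.length ≤ p.2.length
        · have hbp2 : b <+: p.2 :=
            List.prefix_of_prefix_length_le hpre (List.prefix_append p.2 _) (by simpa using hlb)
          have hbad := h4 p hpmem a.length hn han (hdrop ▸ hbp2)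
          rw [htake] at hbad
          refine hg _ hbad ?_
          exact ((List.prefix_append_right_inj a).2 hppre).isInfix
        · have hp2b : p.2 <+: b :=
            List.prefix_of_prefix_length_le (List.prefix_append p.2 _) hpre (by omega)
          exact h5 p hpmem a.length hn han (hdrop ▸ hp2b)
      | none =>
        rw [scan_cons_none M c rest hf] at hpre
        cases b with
        | nil => exact hb rfl
        | cons b0 btl =>
          rw [List.cons_prefix_cons] at hpre
          obtain ⟨rfl, hbtl⟩ := hpre
          cases hbt : btl with
          | nil =>
            apply hnw
            subst hbt
            rw [hwdef]
            exact ⟨rest, by simp⟩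
          | cons x xs =>
            refine ih rest (a ++ [b0]) btl (by simp at hlen ⊢; omega) ?_ (by simp) (by rw [hbt]; simp)
              (by rw [hwdef]; simp) ?_ (hbt ▸ hbtl)
            · simpa using hg
            · simpa using hnw

-- MAIN: one more replace pass on the scan of M equals the scan of M ++ [(w, r)]
lemma main_step_aux (M : List (List Char × List Char)) (w r : List Char) (hyp : pvHyp M w r) :
    ∀ (N : Nat) (t : List Char), t.length ≤ N → pvGood t →
      pvModel w r (scan M t) = scan (M ++ [(w, r)]) t := by
  obtain ⟨h1, h2, h3, h4, h5, h6, h7, h8⟩ := hyp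
  intro N
  induction N with
  | zero =>
    intro t hlen _
    have ht : t = [] := List.eq_nil_of_length_eq_zero (by omega)
    subst ht
    rw [scan, scan, model_nil]
  | succ N ih =>
    intro t hlen hg
    cases t with
    | nil => rw [scan, scan, model_nil]
    | cons c rest =>
      cases hf : M.find? (fun p => p.1.isPrefixOf (c :: rest)) with
      | some p =>
        have hpmem := List.mem_of_find?_eq_some hf
        have hppre : p.1 <+: (c :: rest) := by
          have := List.find?_some hf
          rwa [List.isPrefixOf_iff_prefix] at this
        have hp1 : p.1 ≠ [] := (h2 p hpmem).1
        have hfA : (M ++ [(w, r)]).find? (fun p => p.1.isPrefixOf (c :: rest)) = some p := by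
          rw [List.find?_append, hf]; rfl
        rw [scan_cons_some M c rest p hf hp1, scan_cons_some _ c rest p hfA hp1]
        rw [model_append_of_no_occ w r p.2 _ ?side]
        · rw [ih _ (by have := List.length_pos_of_ne_nil hp1; simp at hlen ⊢; omega)
            (good_mono ((List.drop_suffix _ _).isInfix) hg)]
        case side =>
          intro n hnlt hwp
          rw [List.drop_append_of_le_length (by omega)] at hwp
          by_cases hcase : w.length ≤ p.2.length - n
          · have : w <+: p.2.drop n :=
              List.prefix_of_prefix_length_le hwp (List.prefix_append _ _) (by simp; omega)
            exact h3 p hpmem (this.isInfix.trans (List.drop_suffix n p.2).isInfix)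
          · have : p.2.drop n <+: w :=
              List.prefix_of_prefix_length_le (List.prefix_append _ _) hwp (by simp; omega)
            exact h6 p hpmem n hnlt this
      | none =>
        by_cases hw : w.isPrefixOf (c :: rest)
        · -- the new pattern matches at the head
          have hwpre : w <+: c :: rest := by rwa [List.isPrefixOf_iff_prefix] at hw
          have hfA : (M ++ [(w, r)]).find? (fun p => p.1.isPrefixOf (c :: rest)) = some (w, r) := by
            rw [List.find?_append, hf]
            simp [List.find?, hw]
          rw [scan_cons_some _ c rest (w, r) hfA h1]
          -- decompose t = w ++ s
          have hts : c :: rest = w ++ (c :: rest).drop w.length := List.prefix_append_drop hwpre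
          set s := (c :: rest).drop w.length with hs
          have hcopy : scan M (c :: rest) = w ++ scan M s := by
            rw [hts]
            apply scan_copy
            intro q hq
            rw [← hts]
            cases hq2 : M.find? (fun p => p.1.isPrefixOf ((c :: rest).drop q)) with
            | none => rfl
            | some p' =>
              exfalso
              have hpmem := List.mem_of_find?_eq_some hq2
              have hppre : p'.1 <+: (c :: rest).drop q := by
                have := List.find?_some hq2
                rwa [List.isPrefixOf_iff_prefix] at this
              have hp1 : p'.1 ≠ [] := (h2 p' hpmem).1
              have hp1pos : 0 < p'.1.length := List.length_pos_of_ne_nil hp1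
              have hdq : (c :: rest).drop q = w.drop q ++ s := by
                rw [hts, List.drop_append_of_le_length (by omega)]
              rw [hdq] at hppre
              rcases Nat.eq_zero_or_pos q with hq0 | hqpos
              · subst hq0
                simp only [List.drop_zero] at hppre
                have : p'.1.isPrefixOf (c :: rest) = true := by
                  rw [List.isPrefixOf_iff_prefix, hts]; simpa using hppre
                have := List.find?_eq_none.1 hf p' hpmem
                simp [this] at *
              · by_cases hcase : q + p'.1.length ≤ w.length
                · have : p'.1 <+: w.drop q :=
                    List.prefix_of_prefix_length_le hppre (List.prefix_append _ _) (by simp; omega)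
                  exact h8 p' hpmem q hq hqpos ⟨hcase, this⟩
                · have hdw : w.drop q <+: p'.1 :=
                    List.prefix_of_prefix_length_le (List.prefix_append _ _) hppre (by simp; omega)
                  have hbad := h7 p' hpmem q hq hqpos hdw (by omega)
                  refine hg _ hbad ?_
                  -- w ++ p'.1.drop (w.length - q) is a prefix of c :: rest
                  have hp'split : p'.1 = w.drop q ++ p'.1.drop (w.length - q) := by
                    have := List.prefix_append_drop hdw
                    rw [this]
                    congr 1
                    congr 1
                    simp
                  have hz : p'.1.drop (w.length - q) <+: s := by
                    have := hppre
                    rw [hp'split] at this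
                    exact (List.prefix_append_right_inj _).1 this
                  have : w ++ p'.1.drop (w.length - q) <+: w ++ s :=
                    (List.prefix_append_right_inj w).2 hz
                  rw [← hts] at this
                  exact this.isInfix
          rw [hcopy, model_prefix w r _ h1 (List.prefix_append w _), List.drop_left]
          rw [ih s (by have := List.length_pos_of_ne_nil h1; simp [hs] at hlen ⊢; omega)
            (good_mono ((List.drop_suffix _ _).isInfix) hg)]
        · -- no pattern at all matches at the head
          have hfA : (M ++ [(w, r)]).find? (fun p => p.1.isPrefixOf (c :: rest)) = none := by
            rw [List.find?_append, hf]
            simp [List.find?, hw]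
          rw [scan_cons_none M c rest hf, scan_cons_none _ c rest hfA]
          have hnc : ¬ w <+: c :: scan M rest := by
            intro hcp
            cases hwc : w with
            | nil => exact h1 hwc
            | cons w0 wtl =>
              subst hwc
              rw [List.cons_prefix_cons] at hcp
              obtain ⟨rfl, hwtl⟩ := hcp
              cases hwt : wtl with
              | nil =>
                apply hw
                rw [List.isPrefixOf_iff_prefix, hwt]
                exact ⟨rest, by simp⟩
              | cons x xs =>
                refine nohang_aux M (w0 :: wtl) r ⟨h1, h2, h3, h4, h5, h6, h7, h8⟩
                  rest.length rest [w0] wtl le_rfl (by simpa using hg) (by simp)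
                  (by rw [hwt]; simp) (by simp) ?_ (hwt ▸ hwtl)
                rw [List.isPrefixOf_iff_prefix] at hw
                simpa using hw
          rw [model_cons w r _ _ hnc]
          rw [ih rest (by simp at hlen ⊢; omega) (good_mono (List.suffix_cons c rest).isInfix hg)]

-- folding the remaining passes over the scan of M
lemma chain_eq_scan (L : List (List Char × List Char)) :
    ∀ (M : List (List Char × List Char)), pvHypList M L → ∀ (t : List Char), pvGood t →
      L.foldl (fun u p => PySem.Chars.replace u p.1 p.2) (scan M t) = scan (M ++ L) t := by
  induction L with
  | nil => intro M _ t _; simp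
  | cons p L' ih =>
    intro M hyp t hg
    obtain ⟨h1, h2⟩ := hyp
    simp only [List.foldl_cons]
    rw [replace_eq_model _ _ _ h1.1, main_step_aux M p.1 p.2 h1 t.length t le_rfl hg,
      ih (M ++ [p]) h2 t hg]
    simp

set_option maxHeartbeats 4000000 in
lemma hyplist_pvPairs : pvHypList [] pvPairs := by
  simp only [pvPairs, pvHypList]
  exact ⟨(by unfold pvHyp; exact ⟨by decide, by decide, by decide, by decide, by decide, by decide, by decide, by decide⟩),
    (by unfold pvHyp; exact ⟨by decide, by decide, by decide, by decide, by decide, by decide, by decide, by decide⟩),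
    (by unfold pvHyp; exact ⟨by decide, by decide, by decide, by decide, by decide, by decide, by decide, by decide⟩),
    (by unfold pvHyp; exact ⟨by decide, by decide, by decide, by decide, by decide, by decide, by decide, by decide⟩),
    (by unfold pvHyp; exact ⟨by decide, by decide, by decide, by decide, by decide, by decide, by decide, by decide⟩),
    (by unfold pvHyp; exact ⟨by decide, by decide, by decide, by decide, by decide, by decide, by decide, by decide⟩),
    (by unfold pvHyp; exact ⟨by decide, by decide, by decide, by decide, by decide, by decide, by decide, by decide⟩),
    (by unfold pvHyp; exact ⟨by decide, by decide, by decide, by decide, by decide, by decide, by decide, by decide⟩),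
    (by unfold pvHyp; exact ⟨by decide, by decide, by decide, by decide, by decide, by decide, by decide, by decide⟩),
    (by unfold pvHyp; exact ⟨by decide, by decide, by decide, by decide, by decide, by decide, by decide, by decide⟩),
    (by unfold pvHyp; exact ⟨by decide, by decide, by decide, by decide, by decide, by decide, by decide, by decide⟩),
    (by unfold pvHyp; exact ⟨by decide, by decide, by decide, by decide, by decide, by decide, by decide, by decide⟩),
    (by unfold pvHyp; exact ⟨by decide, by decide, by decide, by decide, by decide, by decide, by decide, by decide⟩),
    (by unfold pvHyp; exact ⟨by decide, by decide, by decide, by decide, by decide, by decide, by decide, by decide⟩),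
    (by unfold pvHyp; exact ⟨by decide, by decide, by decide, by decide, by decide, by decide, by decide, by decide⟩),
    (by unfold pvHyp; exact ⟨by decide, by decide, by decide, by decide, by decide, by decide, by decide, by decide⟩),
    (by unfold pvHyp; exact ⟨by decide, by decide, by decide, by decide, by decide, by decide, by decide, by decide⟩),
    (by unfold pvHyp; exact ⟨by decide, by decide, by decide, by decide, by decide, by decide, by decide, by decide⟩),
    (by unfold pvHyp; exact ⟨by decide, by decide, by decide, by decide, by decide, by decide, by decide, by decide⟩),
    (by unfold pvHyp; exact ⟨by decide, by decide, by decide, by decide, by decide, by decide, by decide, by decide⟩),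
    trivial⟩

-- bridge: scanGo (the B port) equals the reference scanner over pvPairs
lemma scanGo_cons_some (c : Char) (rest : List Char) (out : List (List Char))
    (p : List Char × List Char)
    (hf : pvPairs.find? (fun p => p.1.isPrefixOf (c :: rest)) = some p) (hne : p.1 ≠ []) :
    scanGo (c :: rest) out = scanGo ((c :: rest).drop p.1.length) (out ++ [p.2]) := by
  rw [scanGo]
  split
  · next p' heq =>
    rw [hf] at heq
    cases heq
    rw [dif_neg hne]
  · next heq => rw [hf] at heq; cases heq

lemma scanGo_cons_none (c : Char) (rest : List Char) (out : List (List Char))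
    (hf : pvPairs.find? (fun p => p.1.isPrefixOf (c :: rest)) = none) :
    scanGo (c :: rest) out = scanGo rest (out ++ [[c]]) := by
  rw [scanGo]
  split
  · next p' heq => rw [hf] at heq; cases heq
  · rfl

lemma scanGo_eq_scan : ∀ (N : Nat) (t : List Char), t.length ≤ N → ∀ (out : List (List Char)),
    scanGo t out = out.flatten ++ scan pvPairs t := by
  intro N
  induction N with
  | zero =>
    intro t hlen out
    have ht : t = [] := List.eq_nil_of_length_eq_zero (by omega)
    subst ht
    rw [scanGo, scan, join_nil_flatten]
    simp
  | succ N ih =>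
    intro t hlen out
    cases t with
    | nil =>
      rw [scanGo, scan, join_nil_flatten]
      simp
    | cons c rest =>
      cases hf : pvPairs.find? (fun p => p.1.isPrefixOf (c :: rest)) with
      | some p =>
        have hp1 : p.1 ≠ [] := by
          have hall : ∀ q ∈ pvPairs, q.1 ≠ [] := by decide
          exact hall p (List.mem_of_find?_eq_some hf)
        have hp1pos := List.length_pos_of_ne_nil hp1
        rw [scanGo_cons_some c rest out p hf hp1, scan_cons_some pvPairs c rest p hf hp1]
        rw [ih _ (by simp at hlen ⊢; omega)]
        simp
      | none =>
        rw [scanGo_cons_none c rest out hf, scan_cons_none pvPairs c rest hf]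
        rw [ih _ (by simp at hlen ⊢; omega)]
        simp

-- ===== VERDICT (by name: the statement is the Claim_ definition above) =====
theorem make_child_friendly_spec : Claim_equal_make_child_friendly := by
  intro text _ hpre
  unfold Spec_make_child_friendly make_child_friendly_alt
  have hgood : pvGood text.toList := hpre
  have hB : scanGo text.toList [] = scan pvPairs text.toList := by
    simpa using scanGo_eq_scan text.toList.length text.toList le_rfl []
  have hchain : pvPairs.foldl (fun u p => PySem.Chars.replace u p.1 p.2) text.toList
      = scan pvPairs text.toList := by
    have := chain_eq_scan pvPairs [] hyplist_pvPairs text.toList hgood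
    rwa [scan_nil, List.nil_append] at this
  rw [hB, ← hchain]
  unfold make_child_friendly pvPairs
  simp only [List.foldl_cons, List.foldl_nil, PySem.Str.replace,
    String.toList_ofList,
    show (PySem.Str.lower "violence").toList = "violence".toList by decide,
    show pyCapitalize "violence".toList = "Violence".toList by decide,
    show pyCapitalize "disagreement".toList = "Disagreement".toList by decide,
    show (PySem.Str.lower "war").toList = "war".toList by decide,
    show pyCapitalize "war".toList = "War".toList by decide,
    show pyCapitalize "adventure".toList = "Adventure".toList by decide,
    show (PySem.Str.lower "death").toList = "death".toList by decide,
    show pyCapitalize "death".toList = "Death".toList by decide,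
    show pyCapitalize "sleeping".toList = "Sleeping".toList by decide,
    show (PySem.Str.lower "scary").toList = "scary".toList by decide,
    show pyCapitalize "scary".toList = "Scary".toList by decide,
    show pyCapitalize "exciting".toList = "Exciting".toList by decide,
    show (PySem.Str.lower "fight").toList = "fight".toList by decide,
    show pyCapitalize "fight".toList = "Fight".toList by decide,
    show pyCapitalize "competition".toList = "Competition".toList by decide,
    show (PySem.Str.lower "hurt").toList = "hurt".toList by decide,
    show pyCapitalize "hurt".toList = "Hurt".toList by decide,
    show pyCapitalize "ouch".toList = "Ouch".toList by decide,
    show (PySem.Str.lower "sad").toList = "sad".toList by decide,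
    show pyCapitalize "sad".toList = "Sad".toList by decide,
    show pyCapitalize "thoughtful".toList = "Thoughtful".toList by decide,
    show (PySem.Str.lower "angry").toList = "angry".toList by decide,
    show pyCapitalize "angry".toList = "Angry".toList by decide,
    show pyCapitalize "frustrated".toList = "Frustrated".toList by decide,
    show (PySem.Str.lower "afraid").toList = "afraid".toList by decide,
    show pyCapitalize "afraid".toList = "Afraid".toList by decide,
    show pyCapitalize "curious".toList = "Curious".toList by decide,
    show (PySem.Str.lower "worry").toList = "worry".toList by decide,
    show pyCapitalize "worry".toList = "Worry".toList by decide,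
    show pyCapitalize "wonder".toList = "Wonder".toList by decide]
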